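-- pv_equiv track=rewrite | github.com/MasterPics/MasterPics-Server | core/utils.py | list_to_four_groups
-- ===== SOURCE A (Python) =====
-- def list_to_four_groups(queryset_list):
--     l_zero = []
--     l_one = []
--     l_two = []
--     l_three = []
--     for idx, val in enumerate(queryset_list):
--         if idx % 4 == 0:
--             l_zero.append(val)
--         elif idx % 4 == 1:
--             l_one.append(val)
--         elif idx % 4 == 2:
--             l_two.append(val)
--         else:
--             l_three.append(val)
--     return l_zero, l_one, l_two, l_three
-- ===== SOURCE B (Python) =====
-- def list_to_four_groups(queryset_list):
--     lst = list(queryset_list)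
--     return lst[0::4], lst[1::4], lst[2::4], lst[3::4]
-- ===== Notes on version B (the rewrite author's own statement) =====
-- stated objective: idiomatic
-- what changed: Replaced the enumerate loop with per-index mod-4 branch dispatch by four direct strided-slice extractions lst[k::4].
import Mathlib
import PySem

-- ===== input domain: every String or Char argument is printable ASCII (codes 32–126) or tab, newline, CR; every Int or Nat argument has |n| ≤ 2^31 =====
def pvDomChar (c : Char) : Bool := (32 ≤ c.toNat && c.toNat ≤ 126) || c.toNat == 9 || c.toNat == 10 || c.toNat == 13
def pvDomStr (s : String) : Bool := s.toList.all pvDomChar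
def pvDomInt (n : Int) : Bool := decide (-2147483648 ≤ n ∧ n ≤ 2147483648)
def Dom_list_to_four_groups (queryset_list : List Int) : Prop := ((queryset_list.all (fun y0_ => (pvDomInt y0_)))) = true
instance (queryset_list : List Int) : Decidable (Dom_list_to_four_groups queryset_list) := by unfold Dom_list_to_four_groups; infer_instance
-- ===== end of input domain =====

-- B replaces the per-index mod-4 branch dispatch by four strided-slice extractions lst[k::4] (idiomatic).


-- ===== PORT A =====
-- the enumerate loop: index, four accumulator lists, branch on idx % 4
def pvLoopA : Nat → List Int × List Int × List Int × List Int → List Int → List Int × List Int × List Int × List Int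
  | _, acc, [] => acc
  | i, (z, o, t, h), v :: rest =>
    if i % 4 = 0 then pvLoopA (i + 1) (z ++ [v], o, t, h) rest
    else if i % 4 = 1 then pvLoopA (i + 1) (z, o ++ [v], t, h) rest
    else if i % 4 = 2 then pvLoopA (i + 1) (z, o, t ++ [v], h) rest
    else pvLoopA (i + 1) (z, o, t, h ++ [v]) rest

def list_to_four_groups (queryset_list : List Int) : List Int × List Int × List Int × List Int :=
  pvLoopA 0 ([], [], [], []) queryset_list

-- ===== PORT B =====
-- lst[k::4]: every fourth element; stride4 is the step-4 slice, lst[k::4] = stride4 (lst.drop k)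
def pvStride4 : List Int → List Int
  | [] => []
  | a :: l => a :: pvStride4 (l.drop 3)
termination_by l => l.length
decreasing_by simp

def list_to_four_groups_alt (queryset_list : List Int) : List Int × List Int × List Int × List Int :=
  (pvStride4 queryset_list, pvStride4 (queryset_list.drop 1),
   pvStride4 (queryset_list.drop 2), pvStride4 (queryset_list.drop 3))

-- ===== PRECONDITION & SPEC =====
def Spec_list_to_four_groups (queryset_list : List Int) (out : List Int × List Int × List Int × List Int) : Prop := out = list_to_four_groups_alt queryset_list
instance (queryset_list : List Int) (out : List Int × List Int × List Int × List Int) : Decidable (Spec_list_to_four_groups queryset_list out) := by unfold Spec_list_to_four_groups; infer_instance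

-- ===== CLAIM (what is proved, stated in full; the proofs are below) =====
def Claim_equal_list_to_four_groups : Prop := ∀ (queryset_list : List Int), Dom_list_to_four_groups queryset_list → Spec_list_to_four_groups queryset_list (list_to_four_groups queryset_list)

-- ===== LEMMAS AND PROOFS =====

theorem pvStride4_nil : pvStride4 [] = [] := by rw [pvStride4]

theorem pvStride4_cons (a : Int) (l : List Int) :
    pvStride4 (a :: l) = a :: pvStride4 (l.drop 3) := by rw [pvStride4]

-- extracting the accumulator from A's loop
theorem pvLoopA_acc (l : List Int) : ∀ (i : Nat) (z o t h : List Int),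
    pvLoopA i (z, o, t, h) l =
      ((z ++ (pvLoopA i ([], [], [], []) l).1,
        o ++ (pvLoopA i ([], [], [], []) l).2.1,
        t ++ (pvLoopA i ([], [], [], []) l).2.2.1,
        h ++ (pvLoopA i ([], [], [], []) l).2.2.2)) := by
  induction l with
  | nil => intro i z o t h; simp [pvLoopA]
  | cons v rest ih =>
    intro i z o t h
    simp only [pvLoopA]
    split_ifs with h0 h1 h2
    · rw [ih (i + 1) (z ++ [v]) o t h, ih (i + 1) ([] ++ [v]) [] [] []]
      simp [List.append_assoc]
    · rw [ih (i + 1) z (o ++ [v]) t h, ih (i + 1) [] ([] ++ [v]) [] []]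
      simp [List.append_assoc]
    · rw [ih (i + 1) z o (t ++ [v]) h, ih (i + 1) [] [] ([] ++ [v]) []]
      simp [List.append_assoc]
    · rw [ih (i + 1) z o t (h ++ [v]), ih (i + 1) [] [] [] ([] ++ [v])]
      simp [List.append_assoc]

-- only i % 4 matters
theorem pvLoopA_mod (l : List Int) : ∀ (i : Nat) (acc : List Int × List Int × List Int × List Int),
    pvLoopA (i + 4) acc l = pvLoopA i acc l := by
  induction l with
  | nil => intro i acc; simp [pvLoopA]
  | cons v rest ih =>
    intro i ⟨z, o, t, h⟩
    simp only [pvLoopA, Nat.add_mod_right]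
    have e : i + 4 + 1 = i + 1 + 4 := by omega
    split_ifs <;> rw [e, ih]

theorem pvLoopA_stride : ∀ (l : List Int),
    pvLoopA 0 ([], [], [], []) l =
      (pvStride4 l, pvStride4 (l.drop 1), pvStride4 (l.drop 2), pvStride4 (l.drop 3))
  | [] => by simp [pvLoopA, pvStride4_nil]
  | [a] => by simp [pvLoopA, pvStride4_nil, pvStride4_cons]
  | [a, b] => by simp [pvLoopA, pvStride4_nil, pvStride4_cons]
  | [a, b, c] => by simp [pvLoopA, pvStride4_nil, pvStride4_cons]
  | a :: b :: c :: d :: rest => by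
    have ih := pvLoopA_stride rest
    have h4 : pvLoopA 4 ([a], [b], [c], [d]) rest = pvLoopA 0 ([a], [b], [c], [d]) rest :=
      pvLoopA_mod rest 0 _
    have hacc := pvLoopA_acc rest 0 [a] [b] [c] [d]
    rw [ih] at hacc
    simp only [pvLoopA]
    norm_num
    rw [h4, hacc]
    simp [pvStride4_cons]
termination_by l => l.length

-- ===== VERDICT (by name: the statement is the Claim_ definition above) =====
theorem list_to_four_groups_spec : Claim_equal_list_to_four_groups := by
  intro l _
  unfold Spec_list_to_four_groups list_to_four_groups list_to_four_groups_alt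
  exact pvLoopA_stride l
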